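-- pv_equiv track=rewrite | github.com/russcheems/FunGames | calendar.py | days_afterthegivenyear
-- ===== SOURCE A (Python) =====
-- def if_leapyear(y):
--     """to find if the year is a leap year"""
--     if (y % 4 == 0 and y % 100 != 0) or y % 400 == 0:
--         return True
--     else:
--         return False
--
-- def days_afterthegivenyear(y):
--     """calculate how many days between 1900 and the input year,
--     it does not include days in the input year"""
--     sumdays = 0
--     i = 1900
--     while i < y:
--         if if_leapyear(i) == True:
--             sumdays = sumdays + 366
--         else:
--             sumdays = sumdays + 365
--         i = i + 1
--     return sumdays
-- ===== SOURCE B (Python) =====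
-- def days_afterthegivenyear(y):
--     """calculate how many days between 1900 and the input year,
--     it does not include days in the input year"""
--     if y <= 1900:
--         return 0
--     def leaps_upto(n):
--         # number of leap years in [1, n]
--         return n // 4 - n // 100 + n // 400
--     return 365 * (y - 1900) + leaps_upto(y - 1) - leaps_upto(1899)
-- ===== Notes on version B (the rewrite author's own statement) =====
-- stated objective: faster
-- what changed: Replaced the year-by-year while loop with a closed-form formula: days-per-common-year times the span of years, plus a leap-year count obtained by floor-division arithmetic.
import Mathlib
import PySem

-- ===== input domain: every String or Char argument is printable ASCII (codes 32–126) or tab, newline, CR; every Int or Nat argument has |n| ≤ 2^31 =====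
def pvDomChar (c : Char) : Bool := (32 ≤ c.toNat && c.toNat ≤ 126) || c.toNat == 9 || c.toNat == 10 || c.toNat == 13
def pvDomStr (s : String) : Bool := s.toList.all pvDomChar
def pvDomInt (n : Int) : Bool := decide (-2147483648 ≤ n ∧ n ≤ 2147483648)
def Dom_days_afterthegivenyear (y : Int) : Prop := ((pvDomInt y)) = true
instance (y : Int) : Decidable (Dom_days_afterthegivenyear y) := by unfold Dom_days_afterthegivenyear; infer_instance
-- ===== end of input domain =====

-- B replaces A's year-by-year while loop with a closed-form leap-count formula (constant-time arithmetic instead of one iteration per year).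


-- ===== PORT A =====
def if_leapyear (y : Int) : Bool :=
  if (PySem.Int.mod y 4 == 0 && !(PySem.Int.mod y 100 == 0)) || PySem.Int.mod y 400 == 0 then
    true
  else
    false

-- the while loop of A: state (i, sumdays)
def daysLoopA (y i sumdays : Int) : Int :=
  if i < y then
    daysLoopA y (i + 1) (if if_leapyear i == true then sumdays + 366 else sumdays + 365)
  else
    sumdays
termination_by (y - i).toNat
decreasing_by omega

def days_afterthegivenyear (y : Int) : Int := daysLoopA y 1900 0

-- ===== PORT B =====
-- number of leap years in [1, n]
def leapsUpto (n : Int) : Int :=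
  PySem.Int.floordiv n 4 - PySem.Int.floordiv n 100 + PySem.Int.floordiv n 400

def days_afterthegivenyear_alt (y : Int) : Int :=
  if y ≤ 1900 then 0
  else 365 * (y - 1900) + leapsUpto (y - 1) - leapsUpto 1899

-- ===== PRECONDITION & SPEC =====
def Spec_days_afterthegivenyear (y : Int) (out : Int) : Prop := out = days_afterthegivenyear_alt y
instance (y : Int) (out : Int) : Decidable (Spec_days_afterthegivenyear y out) := by unfold Spec_days_afterthegivenyear; infer_instance

-- ===== CLAIM (what is proved, stated in full; the proofs are below) =====
def Claim_equal_days_afterthegivenyear : Prop := ∀ (y : Int), Dom_days_afterthegivenyear y → Spec_days_afterthegivenyear y (days_afterthegivenyear y)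

-- ===== LEMMAS AND PROOFS =====

theorem if_leapyear_emod (n : Int) :
    if_leapyear n = true ↔ ((n % 4 = 0 ∧ n % 100 ≠ 0) ∨ n % 400 = 0) := by
  unfold if_leapyear
  rw [PySem.Int.mod_eq_emod_of_pos (a := n) (by norm_num),
      PySem.Int.mod_eq_emod_of_pos (a := n) (b := 100) (by norm_num),
      PySem.Int.mod_eq_emod_of_pos (a := n) (b := 400) (by norm_num)]
  simp

-- one year's contribution to the leap count
theorem leapsUpto_step (n : Int) :
    leapsUpto n = leapsUpto (n - 1) + (if if_leapyear n then 1 else 0) := by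
  unfold leapsUpto
  rw [PySem.Int.floordiv_eq_ediv_of_pos (a := n) (by norm_num),
      PySem.Int.floordiv_eq_ediv_of_pos (a := n) (b := 100) (by norm_num),
      PySem.Int.floordiv_eq_ediv_of_pos (a := n) (b := 400) (by norm_num),
      PySem.Int.floordiv_eq_ediv_of_pos (a := n - 1) (by norm_num),
      PySem.Int.floordiv_eq_ediv_of_pos (a := n - 1) (b := 100) (by norm_num),
      PySem.Int.floordiv_eq_ediv_of_pos (a := n - 1) (b := 400) (by norm_num)]
  by_cases hl : (n % 4 = 0 ∧ n % 100 ≠ 0) ∨ n % 400 = 0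
  · rw [if_pos ((if_leapyear_emod n).mpr hl)]
    rcases hl with ⟨h1, h2⟩ | h1 <;> omega
  · rw [if_neg (fun hh => hl ((if_leapyear_emod n).mp hh))]
    omega

theorem daysLoopA_closed (y i s : Int) (hi : i ≤ y) :
    daysLoopA y i s = s + 365 * (y - i) + leapsUpto (y - 1) - leapsUpto (i - 1) := by
  rw [daysLoopA]
  split_ifs with h hleap
  · rw [daysLoopA_closed y (i + 1) _ (by omega)]
    have hs := leapsUpto_step i
    rw [if_pos (by simpa using hleap)] at hs
    have e : i + 1 - 1 = i := by omega
    rw [e]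
    omega
  · rw [daysLoopA_closed y (i + 1) _ (by omega)]
    have hs := leapsUpto_step i
    rw [if_neg (by simpa using hleap)] at hs
    have e : i + 1 - 1 = i := by omega
    rw [e]
    omega
  · have hiy : i = y := by omega
    subst hiy
    omega
termination_by (y - i).toNat
decreasing_by all_goals omega

theorem daysLoopA_stop (y i s : Int) (h : ¬ i < y) : daysLoopA y i s = s := by
  rw [daysLoopA]; simp [h]

-- ===== VERDICT (by name: the statement is the Claim_ definition above) =====
theorem days_afterthegivenyear_spec : Claim_equal_days_afterthegivenyear := by
  intro y _
  unfold Spec_days_afterthegivenyear days_afterthegivenyear days_afterthegivenyear_alt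
  split_ifs with h
  · exact daysLoopA_stop y 1900 0 (by omega)
  · rw [daysLoopA_closed y 1900 0 (by omega), show (1900:Int) - 1 = 1899 from by norm_num]
    omega
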